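-- pv_equiv track=rewrite | github.com/apostolisem/project-planning-open | projectplans/updater.py | _select_asset
-- ===== SOURCE A (Python) =====
-- def _select_asset(assets: list[dict]) -> dict | None:
--     if not assets:
--         return None
--     for asset in assets:
--         name = str(asset.get("name", "")).lower()
--         if name.endswith(".pyw") or name.endswith(".py"):
--             return asset
--     for asset in assets:
--         name = str(asset.get("name", "")).lower()
--         if name.endswith(".zip"):
--             return asset
--     for asset in assets:
--         name = str(asset.get("name", "")).lower()
--         if name.endswith(".exe") or name.endswith(".tar.gz"):
--             return asset
--     keywords = ("app", "main", "project", "source")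
--     for asset in assets:
--         name = str(asset.get("name", "")).lower()
--         if any(keyword in name for keyword in keywords):
--             return asset
--     return assets[0]
-- ===== SOURCE B (Python) =====
-- def _asset_rank(asset: dict) -> int:
--     name = str(asset.get("name", "")).lower()
--     if name.endswith(".pyw") or name.endswith(".py"):
--         return 0
--     if name.endswith(".zip"):
--         return 1
--     if name.endswith(".exe") or name.endswith(".tar.gz"):
--         return 2
--     if any(keyword in name for keyword in ("app", "main", "project", "source")):
--         return 3
--     return 4
--
--
-- def _select_asset(assets: list[dict]) -> dict | None:
--     best = None
--     best_rank = 5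
--     for asset in assets:
--         rank = _asset_rank(asset)
--         if rank < best_rank:
--             best, best_rank = asset, rank
--     return best
-- ===== Notes on version B (the rewrite author's own statement) =====
-- stated objective: alternative
-- what changed: Replaced four sequential full scans of the asset list by a single pass that tracks the best (lowest-rank) asset so far, updating only on a strictly better rank so the earliest asset in the best tier wins.
import Mathlib
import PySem

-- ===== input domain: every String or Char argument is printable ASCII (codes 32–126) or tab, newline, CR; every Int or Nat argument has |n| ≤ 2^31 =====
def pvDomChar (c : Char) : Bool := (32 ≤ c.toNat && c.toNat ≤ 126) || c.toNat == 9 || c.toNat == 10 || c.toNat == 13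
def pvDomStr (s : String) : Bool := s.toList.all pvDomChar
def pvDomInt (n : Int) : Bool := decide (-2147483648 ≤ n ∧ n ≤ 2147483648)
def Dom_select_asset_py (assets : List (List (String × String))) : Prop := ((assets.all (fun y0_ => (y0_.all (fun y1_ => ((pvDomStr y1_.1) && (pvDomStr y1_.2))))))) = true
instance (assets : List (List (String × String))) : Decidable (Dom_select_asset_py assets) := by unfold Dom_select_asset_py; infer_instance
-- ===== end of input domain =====

-- B replaces A's four sequential scans by one pass tracking the best (lowest-rank) asset; same results.

-- ===== PORT A =====
-- name = str(asset.get("name", "")).lower()   (values are str, so str() is the identity)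
def pvName (asset : List (String × String)) : String :=
  PySem.Str.lower (PySem.Dict.getD (PySem.Dict.mk asset) "name" "")

def pvC0 (asset : List (String × String)) : Bool :=
  PySem.Str.endswith (pvName asset) ".pyw" || PySem.Str.endswith (pvName asset) ".py"

def pvC1 (asset : List (String × String)) : Bool :=
  PySem.Str.endswith (pvName asset) ".zip"

def pvC2 (asset : List (String × String)) : Bool :=
  PySem.Str.endswith (pvName asset) ".exe" || PySem.Str.endswith (pvName asset) ".tar.gz"

-- any(keyword in name for keyword in ("app", "main", "project", "source"))
def pvC3 (asset : List (String × String)) : Bool :=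
  ["app", "main", "project", "source"].any (fun kw => PySem.Str.isIn kw (pvName asset))

def select_asset_py (assets : List (List (String × String))) : Option (List (String × String)) :=
  if assets = [] then none
  else
    match assets.find? pvC0 with
    | some a => some a
    | none =>
      match assets.find? pvC1 with
      | some a => some a
      | none =>
        match assets.find? pvC2 with
        | some a => some a
        | none =>
          match assets.find? pvC3 with
          | some a => some a
          | none => PySem.List.pyGet? assets 0   -- assets[0]; assets is nonempty here

-- ===== PORT B =====
def pvRank (asset : List (String × String)) : Nat :=
  if pvC0 asset then 0
  else if pvC1 asset then 1
  else if pvC2 asset then 2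
  else if pvC3 asset then 3
  else 4

def select_asset_py_alt (assets : List (List (String × String))) : Option (List (String × String)) :=
  (assets.foldl
    (fun (st : Option (List (String × String)) × Nat) asset =>
      if pvRank asset < st.2 then (some asset, pvRank asset) else st)
    (none, 5)).1

-- ===== PRECONDITION & SPEC =====
def Spec_select_asset_py (assets : List (List (String × String))) (out : Option (List (String × String))) : Prop := out = select_asset_py_alt assets
instance (assets : List (List (String × String))) (out : Option (List (String × String))) : Decidable (Spec_select_asset_py assets out) := by unfold Spec_select_asset_py; infer_instance

-- ===== CLAIM (what is proved, stated in full; the proofs are below) =====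
def Claim_equal_select_asset_py : Prop := ∀ (assets : List (List (String × String))), Dom_select_asset_py assets → Spec_select_asset_py assets (select_asset_py assets)

-- ===== LEMMAS AND PROOFS =====

-- minimum rank of a list of assets, capped at 5
def pvMinRk : List (List (String × String)) → Nat
  | [] => 5
  | a :: t => min (pvRank a) (pvMinRk t)

lemma pvRank_le_four (a : List (String × String)) : pvRank a ≤ 4 := by
  unfold pvRank; split_ifs <;> omega

lemma pvMinRk_le (l : List (List (String × String))) (a : List (String × String))
    (h : a ∈ l) : pvMinRk l ≤ pvRank a := by
  induction l with
  | nil => cases h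
  | cons x t ih =>
    rcases List.mem_cons.mp h with h | h
    · subst h; simp [pvMinRk]
    · have := ih h; simp only [pvMinRk]; omega

lemma pvMinRk_attained (l : List (List (String × String))) (h : l ≠ []) :
    ∃ a ∈ l, pvRank a = pvMinRk l := by
  induction l with
  | nil => exact absurd rfl h
  | cons x t ih =>
    by_cases ht : t = []
    · subst ht
      refine ⟨x, by simp, ?_⟩
      have := pvRank_le_four x
      simp only [pvMinRk]; omega
    · rcases ih ht with ⟨a, ha, hr⟩
      by_cases hle : pvMinRk t ≤ pvRank x
      · refine ⟨a, by simp [ha], ?_⟩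
        simp only [pvMinRk]; omega
      · refine ⟨x, by simp, ?_⟩
        simp only [pvMinRk]; omega

lemma pvFind_congr {α : Type} (l : List α) (p q : α → Bool)
    (h : ∀ a ∈ l, p a = q a) : l.find? p = l.find? q := by
  induction l with
  | nil => rfl
  | cons x t ih =>
    simp only [List.find?]
    rw [h x (by simp)]
    cases q x
    · exact ih (fun a ha => h a (by simp [ha]))
    · rfl

-- characterization of B's fold
lemma pvFold_eq (l : List (List (String × String)))
    (b : Option (List (String × String))) (k : Nat) (hk : k ≤ 5) :
    l.foldl
      (fun (st : Option (List (String × String)) × Nat) asset =>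
        if pvRank asset < st.2 then (some asset, pvRank asset) else st)
      (b, k)
    = if pvMinRk l < k then (l.find? (fun a => pvRank a == pvMinRk l), pvMinRk l) else (b, k) := by
  induction l generalizing b k with
  | nil => simp [pvMinRk]; omega
  | cons x t ih =>
    simp only [List.foldl, pvMinRk]
    by_cases hx : pvRank x < k
    · rw [if_pos hx]
      rw [ih _ _ (by have := pvRank_le_four x; omega)]
      by_cases hm : pvMinRk t < pvRank x
      · have h1 : min (pvRank x) (pvMinRk t) = pvMinRk t := by omega
        rw [if_pos hm, h1, if_pos (by omega)]
        have hne : (pvRank x == pvMinRk t) = false := by simp; omega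
        simp [List.find?, hne]
      · have h1 : min (pvRank x) (pvMinRk t) = pvRank x := by omega
        rw [if_neg hm, h1, if_pos hx]
        simp [List.find?]
    · rw [if_neg hx]
      rw [ih _ _ hk]
      by_cases hm : pvMinRk t < k
      · have h1 : min (pvRank x) (pvMinRk t) = pvMinRk t := by omega
        rw [if_pos hm, h1, if_pos (by omega)]
        have hne : (pvRank x == pvMinRk t) = false := by simp; omega
        simp [List.find?, hne]
      · have h1 : ¬ (min (pvRank x) (pvMinRk t) < k) := by omega
        rw [if_neg hm, if_neg h1]

lemma pvAlt_eq (assets : List (List (String × String))) (h : assets ≠ []) :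
    select_asset_py_alt assets = assets.find? (fun a => pvRank a == pvMinRk assets) := by
  unfold select_asset_py_alt
  rw [pvFold_eq _ _ _ (by omega)]
  have h5 : pvMinRk assets < 5 := by
    rcases pvMinRk_attained assets h with ⟨a, _, hr⟩
    have := pvRank_le_four a; omega
  rw [if_pos h5]

-- rank/condition bridges
lemma pvRank_eq_zero (a : List (String × String)) : (pvRank a == 0) = pvC0 a := by
  unfold pvRank; split_ifs with h0 h1 h2 h3 <;> simp [*]

lemma pvRank_eq_one (a : List (String × String)) (h : pvC0 a = false) :
    (pvRank a == 1) = pvC1 a := by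
  unfold pvRank; rw [if_neg (by simp [h])]; split_ifs with h1 h2 h3 <;> simp [*]

lemma pvRank_eq_two (a : List (String × String)) (h0 : pvC0 a = false) (h1 : pvC1 a = false) :
    (pvRank a == 2) = pvC2 a := by
  unfold pvRank
  rw [if_neg (by simp [h0]), if_neg (by simp [h1])]
  split_ifs with h2 h3 <;> simp [*]

lemma pvRank_eq_three (a : List (String × String)) (h0 : pvC0 a = false) (h1 : pvC1 a = false)
    (h2 : pvC2 a = false) : (pvRank a == 3) = pvC3 a := by
  unfold pvRank
  rw [if_neg (by simp [h0]), if_neg (by simp [h1]), if_neg (by simp [h2])]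
  split_ifs with h3 <;> simp [*]

lemma pvRank_eq_four (a : List (String × String)) (h0 : pvC0 a = false) (h1 : pvC1 a = false)
    (h2 : pvC2 a = false) (h3 : pvC3 a = false) : pvRank a = 4 := by
  unfold pvRank; simp [h0, h1, h2, h3]

-- ===== VERDICT (by name: the statement is the Claim_ definition above) =====
theorem select_asset_py_spec : Claim_equal_select_asset_py := by
  intro assets _
  unfold Spec_select_asset_py
  by_cases hne : assets = []
  · subst hne; rfl
  · rw [pvAlt_eq assets hne]
    unfold select_asset_py
    rw [if_neg hne]
    cases hf0 : assets.find? pvC0 with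
    | some a =>
      have ha := List.find?_some hf0
      have hmem := List.mem_of_find?_eq_some hf0
      have hr : pvRank a = 0 := by
        have := pvRank_eq_zero a
        rw [ha] at this; simpa using this
      have hm : pvMinRk assets = 0 := by
        have := pvMinRk_le assets a hmem; omega
      have hc : assets.find? (fun a => pvRank a == pvMinRk assets) = assets.find? pvC0 := by
        rw [hm]; exact pvFind_congr _ _ _ (fun a _ => pvRank_eq_zero a)
      rw [hc, hf0]
    | none =>
      have h0 : ∀ a ∈ assets, pvC0 a = false := by
        intro a ha
        simpa using List.find?_eq_none.mp hf0 a ha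
      cases hf1 : assets.find? pvC1 with
      | some a =>
        have ha := List.find?_some hf1
        have hmem := List.mem_of_find?_eq_some hf1
        have hr : pvRank a = 1 := by
          have := pvRank_eq_one a (h0 a hmem)
          rw [ha] at this; simpa using this
        have hm : pvMinRk assets = 1 := by
          have hle := pvMinRk_le assets a hmem
          rcases pvMinRk_attained assets hne with ⟨b, hb, hrb⟩
          have hne0 : pvRank b ≠ 0 := by
            intro h
            have := pvRank_eq_zero b
            rw [h, h0 b hb] at this; simp at this
          omega
        have hc : assets.find? (fun a => pvRank a == pvMinRk assets) = assets.find? pvC1 := by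
          rw [hm]; exact pvFind_congr _ _ _ (fun a ha => pvRank_eq_one a (h0 a ha))
        rw [hc, hf1]
      | none =>
        have h1 : ∀ a ∈ assets, pvC1 a = false := by
          intro a ha
          simpa using List.find?_eq_none.mp hf1 a ha
        cases hf2 : assets.find? pvC2 with
        | some a =>
          have ha := List.find?_some hf2
          have hmem := List.mem_of_find?_eq_some hf2
          have hr : pvRank a = 2 := by
            have := pvRank_eq_two a (h0 a hmem) (h1 a hmem)
            rw [ha] at this; simpa using this
          have hm : pvMinRk assets = 2 := by
            have hle := pvMinRk_le assets a hmem
            rcases pvMinRk_attained assets hne with ⟨b, hb, hrb⟩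
            have hne0 : pvRank b ≠ 0 := by
              intro h
              have := pvRank_eq_zero b
              rw [h, h0 b hb] at this; simp at this
            have hne1 : pvRank b ≠ 1 := by
              intro h
              have := pvRank_eq_one b (h0 b hb)
              rw [h, h1 b hb] at this; simp at this
            omega
          have hc : assets.find? (fun a => pvRank a == pvMinRk assets) = assets.find? pvC2 := by
            rw [hm]; exact pvFind_congr _ _ _ (fun a ha => pvRank_eq_two a (h0 a ha) (h1 a ha))
          rw [hc, hf2]
        | none =>
          have h2 : ∀ a ∈ assets, pvC2 a = false := by
            intro a ha
            simpa using List.find?_eq_none.mp hf2 a ha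
          cases hf3 : assets.find? pvC3 with
          | some a =>
            have ha := List.find?_some hf3
            have hmem := List.mem_of_find?_eq_some hf3
            have hr : pvRank a = 3 := by
              have := pvRank_eq_three a (h0 a hmem) (h1 a hmem) (h2 a hmem)
              rw [ha] at this; simpa using this
            have hm : pvMinRk assets = 3 := by
              have hle := pvMinRk_le assets a hmem
              rcases pvMinRk_attained assets hne with ⟨b, hb, hrb⟩
              have hne0 : pvRank b ≠ 0 := by
                intro h
                have := pvRank_eq_zero b
                rw [h, h0 b hb] at this; simp at this
              have hne1 : pvRank b ≠ 1 := by
                intro h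
                have := pvRank_eq_one b (h0 b hb)
                rw [h, h1 b hb] at this; simp at this
              have hne2 : pvRank b ≠ 2 := by
                intro h
                have := pvRank_eq_two b (h0 b hb) (h1 b hb)
                rw [h, h2 b hb] at this; simp at this
              omega
            have hc : assets.find? (fun a => pvRank a == pvMinRk assets) = assets.find? pvC3 := by
              rw [hm]
              exact pvFind_congr _ _ _ (fun a ha => pvRank_eq_three a (h0 a ha) (h1 a ha) (h2 a ha))
            rw [hc, hf3]
          | none =>
            have h3 : ∀ a ∈ assets, pvC3 a = false := by
              intro a ha
              simpa using List.find?_eq_none.mp hf3 a ha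
            have hall4 : ∀ a ∈ assets, pvRank a = 4 :=
              fun a ha => pvRank_eq_four a (h0 a ha) (h1 a ha) (h2 a ha) (h3 a ha)
            have hm : pvMinRk assets = 4 := by
              rcases pvMinRk_attained assets hne with ⟨b, hb, hrb⟩
              rw [← hrb, hall4 b hb]
            cases assets with
            | nil => exact absurd rfl hne
            | cons x t =>
              rw [hm]
              have hx4 : pvRank x = 4 := hall4 x (by simp)
              simp [PySem.List.pyGet?, PySem.List.pyIdx?, List.find?, hx4]
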